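-- pv_equiv track=rewrite | github.com/AlibabaResearch/DAMO-ConvAI | star/LGESQL/sparc/preprocess/parse_sql/get_label_diff.py | get_label_struct
-- ===== SOURCE A (Python) =====
-- STRUCT_KEYWORDS = ["WHERE", "GROUP_BY", "HAVING", "ORDER_BY", "SELECT"]
--
-- NEST_KEYWORDS = ["NONE","OP_SEL"]
--
-- UEI_KEYWORDS = ["NONE","INTERSECT","UNION","EXCEPT"]
--
-- ALL_OPS = ["NONE","NOT_IN", "IN", "BETWEEN", "=", ">", "<", ">=", "<=", "LIKE", "!="]
--
-- AGGS = ["NONE","COUNT", "MAX", "MIN", "SUM", "AVG"]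
--
-- DASCS = ["NONE","ASC", "DESC"]
--
-- OTHER_KEYWORDS = ["NONE","LIMIT"]
--
-- UEI_dict = {item:idx for idx,item in enumerate(UEI_KEYWORDS)}
--
-- NEST_dict = {item:idx for idx,item in enumerate(NEST_KEYWORDS)}
--
-- ALL_OPS_dict = {item:idx for idx,item in enumerate(ALL_OPS)}
--
-- AGGS_dict = {item:idx for idx,item in enumerate(AGGS)}
--
-- DASCS_dict = {item:idx for idx,item in enumerate(DASCS)}
--
-- OTHER_KEYWORDS_dict = {item:idx for idx,item in enumerate(OTHER_KEYWORDS)}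
--
-- def get_label_struct(label_split):
--     # label_all = {'SELECT':[],'WHERE':[],'GROUP_BY':[],'ORDER_BY':[],'HAVING':[]}
--     label_all = {}
--
--     for item in label_split:
--         temp = [0, 0, 0, 0, 0, 0]
--         save_tok = ''
--         for tok in item.split():
--             if tok in NEST_KEYWORDS:
--                 temp[0] = NEST_dict[tok]
--             if tok in UEI_KEYWORDS:
--                 temp[1] = UEI_dict[tok]
--             if tok in STRUCT_KEYWORDS:
--                 save_tok = tok
--             if tok in ALL_OPS:
--                 temp[2] = ALL_OPS_dict[tok]
--             if tok in AGGS: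
--                 temp[3] = AGGS_dict[tok]
--             if tok in DASCS:
--                 temp[4] = DASCS_dict[tok]
--             if tok in OTHER_KEYWORDS:
--                 temp[5] = OTHER_KEYWORDS_dict[tok]
--         if save_tok in label_all.keys():
--             label_all[save_tok].append(temp)
--         else:
--             label_all[save_tok] = [temp]
--     return label_all
-- ===== SOURCE B (Python) =====
-- STRUCT_KEYWORDS = ["WHERE", "GROUP_BY", "HAVING", "ORDER_BY", "SELECT"]
--
-- NEST_KEYWORDS = ["NONE", "OP_SEL"]
-- UEI_KEYWORDS = ["NONE", "INTERSECT", "UNION", "EXCEPT"]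
-- ALL_OPS = ["NONE", "NOT_IN", "IN", "BETWEEN", "=", ">", "<", ">=", "<=", "LIKE", "!="]
-- AGGS = ["NONE", "COUNT", "MAX", "MIN", "SUM", "AVG"]
-- DASCS = ["NONE", "ASC", "DESC"]
-- OTHER_KEYWORDS = ["NONE", "LIMIT"]
--
-- # one index dict per category; slot i of the label vector is decided
-- # independently by the LAST token of the item that belongs to category i
-- CATS = [{tok: idx for idx, tok in enumerate(lst)}
--         for lst in (NEST_KEYWORDS, UEI_KEYWORDS, ALL_OPS, AGGS, DASCS, OTHER_KEYWORDS)]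
--
--
-- def get_label_struct(label_split):
--     label_all = {}
--     for item in label_split:
--         rev = item.split()[::-1]
--         # slot-wise backward search: last token of each category wins
--         temp = [next((d[t] for t in rev if t in d), 0) for d in CATS]
--         save_tok = next((t for t in rev if t in STRUCT_KEYWORDS), '')
--         label_all.setdefault(save_tok, []).append(temp)
--     return label_all
-- ===== Notes on version B (the rewrite author's own statement) =====
-- stated objective: alternative
-- what changed: A makes one forward stateful pass per item, overwriting six slots and save_tok as it goes; B instead decides each of the six slots independently by a backward search for the last token of that category (and save_tok by a backward search for the last structural keyword), building the vector slot-by-slot with no mutable loop state.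
import Mathlib
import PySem

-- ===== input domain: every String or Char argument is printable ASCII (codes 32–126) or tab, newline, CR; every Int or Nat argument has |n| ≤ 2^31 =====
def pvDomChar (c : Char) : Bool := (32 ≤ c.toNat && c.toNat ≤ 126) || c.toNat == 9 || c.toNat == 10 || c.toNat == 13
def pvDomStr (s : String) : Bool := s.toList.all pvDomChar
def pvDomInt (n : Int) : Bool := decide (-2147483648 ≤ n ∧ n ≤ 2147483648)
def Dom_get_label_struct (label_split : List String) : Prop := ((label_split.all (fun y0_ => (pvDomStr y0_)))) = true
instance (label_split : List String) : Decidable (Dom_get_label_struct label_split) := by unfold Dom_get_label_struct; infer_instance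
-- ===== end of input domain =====

-- B replaces A's single forward stateful pass per item by independent backward searches:
-- each of the six slots is the value of the LAST token of its category, save_tok the last
-- structural keyword (objective: alternative decomposition, no mutable loop state).

-- ===== PORT A =====
def STRUCT_KEYWORDS : List String := ["WHERE", "GROUP_BY", "HAVING", "ORDER_BY", "SELECT"]
def NEST_KEYWORDS : List String := ["NONE", "OP_SEL"]
def UEI_KEYWORDS : List String := ["NONE", "INTERSECT", "UNION", "EXCEPT"]
def ALL_OPS : List String := ["NONE", "NOT_IN", "IN", "BETWEEN", "=", ">", "<", ">=", "<=", "LIKE", "!="]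
def AGGS : List String := ["NONE", "COUNT", "MAX", "MIN", "SUM", "AVG"]
def DASCS : List String := ["NONE", "ASC", "DESC"]
def OTHER_KEYWORDS : List String := ["NONE", "LIMIT"]

-- {item: idx for idx, item in enumerate(L)}
def pvEnumDict (l : List String) : PySem.Dict String Int :=
  PySem.Dict.ofList ((PySem.List.enumerate l 0).map (fun p => (p.2, p.1)))

def UEI_dict : PySem.Dict String Int := pvEnumDict UEI_KEYWORDS
def NEST_dict : PySem.Dict String Int := pvEnumDict NEST_KEYWORDS
def ALL_OPS_dict : PySem.Dict String Int := pvEnumDict ALL_OPS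
def AGGS_dict : PySem.Dict String Int := pvEnumDict AGGS
def DASCS_dict : PySem.Dict String Int := pvEnumDict DASCS
def OTHER_KEYWORDS_dict : PySem.Dict String Int := pvEnumDict OTHER_KEYWORDS

-- one iteration of A's inner `for tok in item.split()` loop; the `D[tok]` lookups are ported
-- as getD (exact here: each lookup sits under the membership guard that makes the key present)
def pvStepA (st : List Int × String) (tok : String) : List Int × String :=
  let temp := st.1
  let save := st.2
  let temp := if NEST_KEYWORDS.contains tok then temp.set 0 (NEST_dict.getD tok 0) else temp
  let temp := if UEI_KEYWORDS.contains tok then temp.set 1 (UEI_dict.getD tok 0) else temp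
  let save := if STRUCT_KEYWORDS.contains tok then tok else save
  let temp := if ALL_OPS.contains tok then temp.set 2 (ALL_OPS_dict.getD tok 0) else temp
  let temp := if AGGS.contains tok then temp.set 3 (AGGS_dict.getD tok 0) else temp
  let temp := if DASCS.contains tok then temp.set 4 (DASCS_dict.getD tok 0) else temp
  let temp := if OTHER_KEYWORDS.contains tok then temp.set 5 (OTHER_KEYWORDS_dict.getD tok 0) else temp
  (temp, save)

def get_label_struct (label_split : List String) : List (String × List (List Int)) :=
  (label_split.foldl
    (fun (label_all : PySem.Dict String (List (List Int))) item =>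
      let st := (PySem.Str.split₀ item).foldl pvStepA ([0, 0, 0, 0, 0, 0], "")
      -- `if save_tok in label_all.keys(): label_all[save_tok].append(temp) else: …`
      if label_all.contains st.2 then label_all.modify st.2 [] (· ++ [st.1])
      else label_all.insert st.2 [st.1])
    PySem.Dict.empty).items

-- ===== PORT B =====
def pvCATS : List (PySem.Dict String Int) :=
  [NEST_dict, UEI_dict, ALL_OPS_dict, AGGS_dict, DASCS_dict, OTHER_KEYWORDS_dict]

-- next((d[t] for t in rev if t in d), 0): first hit of the reversed token list
def pvLastHit (rev : List String) (d : PySem.Dict String Int) : Int :=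
  match rev.find? (fun t => d.contains t) with
  | some t => d.getD t 0
  | none => 0

def get_label_struct_alt (label_split : List String) : List (String × List (List Int)) :=
  (label_split.foldl
    (fun (label_all : PySem.Dict String (List (List Int))) item =>
      let rev := (PySem.Str.split₀ item).reverse   -- item.split()[::-1]
      let temp := pvCATS.map (fun d => pvLastHit rev d)
      let save := (rev.find? (fun t => STRUCT_KEYWORDS.contains t)).getD ""
      -- label_all.setdefault(save_tok, []).append(temp)
      (label_all.setdefault save []).modify save [] (· ++ [temp]))
    PySem.Dict.empty).items

-- ===== PRECONDITION & SPEC =====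
def Spec_get_label_struct (label_split : List String) (out : List (String × List (List Int))) : Prop := out = get_label_struct_alt label_split
instance (label_split : List String) (out : List (String × List (List Int))) : Decidable (Spec_get_label_struct label_split out) := by unfold Spec_get_label_struct; infer_instance

-- ===== CLAIM (what is proved, stated in full; the proofs are below) =====
def Claim_equal_get_label_struct : Prop := ∀ (label_split : List String), Dom_get_label_struct label_split → Spec_get_label_struct label_split (get_label_struct label_split)

-- ===== LEMMAS AND PROOFS =====

-- pvLastHit with an arbitrary fallback, to state the loop invariant
def pvLastHitD (rev : List String) (d : PySem.Dict String Int) (init : Int) : Int :=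
  match rev.find? (fun t => d.contains t) with
  | some t => d.getD t 0
  | none => init

lemma pvLastHitD_snoc (rest : List String) (tok : String) (d : PySem.Dict String Int) (init : Int) :
    pvLastHitD ((tok :: rest).reverse) d init
      = pvLastHitD rest.reverse d (if d.contains tok then d.getD tok 0 else init) := by
  simp only [pvLastHitD, List.reverse_cons, List.find?_append]
  cases h : rest.reverse.find? (fun t => d.contains t) with
  | some t => simp
  | none =>
    simp only [Option.none_or]
    by_cases hc : d.contains tok <;> simp [List.find?, hc]

lemma pvSave_snoc (rest : List String) (tok save : String) :
    (((tok :: rest).reverse.find? (fun t => STRUCT_KEYWORDS.contains t)).getD save)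
      = ((rest.reverse.find? (fun t => STRUCT_KEYWORDS.contains t)).getD
          (if STRUCT_KEYWORDS.contains tok then tok else save)) := by
  simp only [List.reverse_cons, List.find?_append]
  cases h : rest.reverse.find? (fun t => STRUCT_KEYWORDS.contains t) with
  | some t => simp
  | none =>
    simp only [Option.none_or]
    by_cases hm : tok ∈ STRUCT_KEYWORDS <;> simp [List.find?, hm]

-- list membership in each category equals membership in its enumeration dict
lemma pvContains_NEST (t : String) : NEST_dict.contains t = NEST_KEYWORDS.contains t := by
  have h : NEST_dict.items = [("NONE", (0:Int)), ("OP_SEL", 1)] := by rfl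
  simp [PySem.Dict.contains, h, NEST_KEYWORDS, beq_eq_decide, eq_comm]
lemma pvContains_UEI (t : String) : UEI_dict.contains t = UEI_KEYWORDS.contains t := by
  have h : UEI_dict.items = [("NONE", (0:Int)), ("INTERSECT", 1), ("UNION", 2), ("EXCEPT", 3)] := by rfl
  simp [PySem.Dict.contains, h, UEI_KEYWORDS, beq_eq_decide, eq_comm]
lemma pvContains_ALL_OPS (t : String) : ALL_OPS_dict.contains t = ALL_OPS.contains t := by
  have h : ALL_OPS_dict.items = [("NONE", (0:Int)), ("NOT_IN", 1), ("IN", 2), ("BETWEEN", 3), ("=", 4), (">", 5), ("<", 6), (">=", 7), ("<=", 8), ("LIKE", 9), ("!=", 10)] := by rfl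
  simp [PySem.Dict.contains, h, ALL_OPS, beq_eq_decide, eq_comm]
lemma pvContains_AGGS (t : String) : AGGS_dict.contains t = AGGS.contains t := by
  have h : AGGS_dict.items = [("NONE", (0:Int)), ("COUNT", 1), ("MAX", 2), ("MIN", 3), ("SUM", 4), ("AVG", 5)] := by rfl
  simp [PySem.Dict.contains, h, AGGS, beq_eq_decide, eq_comm]
lemma pvContains_DASCS (t : String) : DASCS_dict.contains t = DASCS.contains t := by
  have h : DASCS_dict.items = [("NONE", (0:Int)), ("ASC", 1), ("DESC", 2)] := by rfl
  simp [PySem.Dict.contains, h, DASCS, beq_eq_decide, eq_comm]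
lemma pvContains_OTHER (t : String) : OTHER_KEYWORDS_dict.contains t = OTHER_KEYWORDS.contains t := by
  have h : OTHER_KEYWORDS_dict.items = [("NONE", (0:Int)), ("LIMIT", 1)] := by rfl
  simp [PySem.Dict.contains, h, OTHER_KEYWORDS, beq_eq_decide, eq_comm]

-- one A-step written out slot by slot
lemma pvStepA_eval (a b c d e f : Int) (save tok : String) :
    pvStepA ([a, b, c, d, e, f], save) tok =
      ([if NEST_dict.contains tok then NEST_dict.getD tok 0 else a,
        if UEI_dict.contains tok then UEI_dict.getD tok 0 else b,
        if ALL_OPS_dict.contains tok then ALL_OPS_dict.getD tok 0 else c,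
        if AGGS_dict.contains tok then AGGS_dict.getD tok 0 else d,
        if DASCS_dict.contains tok then DASCS_dict.getD tok 0 else e,
        if OTHER_KEYWORDS_dict.contains tok then OTHER_KEYWORDS_dict.getD tok 0 else f],
       if STRUCT_KEYWORDS.contains tok then tok else save) := by
  simp only [pvStepA, pvContains_NEST, pvContains_UEI, pvContains_ALL_OPS, pvContains_AGGS,
    pvContains_DASCS, pvContains_OTHER]
  split_ifs <;> rfl

-- the invariant: A's forward fold computes the six backward last-hits and the last struct keyword
lemma pvFoldA_eq (toks : List String) (a b c d e f : Int) (save : String) :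
    toks.foldl pvStepA ([a, b, c, d, e, f], save) =
      ([pvLastHitD toks.reverse NEST_dict a,
        pvLastHitD toks.reverse UEI_dict b,
        pvLastHitD toks.reverse ALL_OPS_dict c,
        pvLastHitD toks.reverse AGGS_dict d,
        pvLastHitD toks.reverse DASCS_dict e,
        pvLastHitD toks.reverse OTHER_KEYWORDS_dict f],
       (toks.reverse.find? (fun t => STRUCT_KEYWORDS.contains t)).getD save) := by
  induction toks generalizing a b c d e f save with
  | nil => rfl
  | cons tok rest ih =>
    rw [List.foldl_cons, pvStepA_eval, ih]
    rw [pvLastHitD_snoc, pvLastHitD_snoc, pvLastHitD_snoc, pvLastHitD_snoc,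
      pvLastHitD_snoc, pvLastHitD_snoc, pvSave_snoc]

lemma pvLastHitD_zero (rev : List String) (d : PySem.Dict String Int) :
    pvLastHitD rev d 0 = pvLastHit rev d := rfl

lemma pvUpd_eq (d : PySem.Dict String (List (List Int))) (k : String) (v : List Int) :
    (if d.contains k then d.modify k [] (· ++ [v]) else d.insert k [v])
      = (d.setdefault k []).modify k [] (· ++ [v]) := by
  by_cases h : d.contains k
  · simp [h, PySem.Dict.setdefault_of_contains d [] h]
  · have h' : d.contains k = false := by simpa using h
    rw [PySem.Dict.setdefault_of_not_contains d [] h']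
    simp [h', PySem.Dict.modify, PySem.Dict.getD_insert_self,
      PySem.Dict.insert_insert_self]

-- ===== VERDICT (by name: the statement is the Claim_ definition above) =====
theorem get_label_struct_spec : Claim_equal_get_label_struct := by
  intro label_split _
  unfold Spec_get_label_struct get_label_struct get_label_struct_alt
  congr 1
  apply PySem.List.foldl_congr_mem
  intro acc item _
  simp only [pvFoldA_eq, pvLastHitD_zero, pvCATS, List.map, pvUpd_eq]
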